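-- pv_equiv track=rewrite | github.com/dmhernandez2525/splice3d | postprocessor/filament_feed_validation.py | validate_safety_features
-- ===== SOURCE A (Python) =====
-- from typing import Any
--
-- def validate_safety_features(spec: dict[str, Any]) -> list[str]:
--     errors: list[str] = []
--     required = {
--         "filament_runout_detection",
--         "jam_detection",
--         "cold_extrusion_prevention",
--         "encoder_based_tension_monitoring",
--         "emergency_abort",
--     }
--     declared = set(spec.get("safety_features", []))
--     for feat in sorted(required - declared):
--         errors.append(f"Missing safety feature: {feat}")
--     return errors
-- ===== SOURCE B (Python) =====
-- def validate_safety_features(spec):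
--     # One pass over the declared features flipping five flags; no sets, no sorting.
--     has_cold = has_abort = has_enc = has_runout = has_jam = False
--     for f in spec.get("safety_features", []):
--         if f == "cold_extrusion_prevention":
--             has_cold = True
--         elif f == "emergency_abort":
--             has_abort = True
--         elif f == "encoder_based_tension_monitoring":
--             has_enc = True
--         elif f == "filament_runout_detection":
--             has_runout = True
--         elif f == "jam_detection":
--             has_jam = True
--     errors = []
--     if not has_cold:
--         errors.append("Missing safety feature: cold_extrusion_prevention")
--     if not has_abort:
--         errors.append("Missing safety feature: emergency_abort")
--     if not has_enc:
--         errors.append("Missing safety feature: encoder_based_tension_monitoring")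
--     if not has_runout:
--         errors.append("Missing safety feature: filament_runout_detection")
--     if not has_jam:
--         errors.append("Missing safety feature: jam_detection")
--     return errors
-- ===== Notes on version B (the rewrite author's own statement) =====
-- stated objective: alternative
-- what changed: B builds no sets, computes no set difference and never sorts: a single pass over the declared feature list flips five boolean flags in a state machine, then an unrolled chain of five checks (pre-written in alphabetical order) appends a message for each unset flag; it trades A's set/sort machinery for explicit flags and an unrolled emit chain.
import Mathlib
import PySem

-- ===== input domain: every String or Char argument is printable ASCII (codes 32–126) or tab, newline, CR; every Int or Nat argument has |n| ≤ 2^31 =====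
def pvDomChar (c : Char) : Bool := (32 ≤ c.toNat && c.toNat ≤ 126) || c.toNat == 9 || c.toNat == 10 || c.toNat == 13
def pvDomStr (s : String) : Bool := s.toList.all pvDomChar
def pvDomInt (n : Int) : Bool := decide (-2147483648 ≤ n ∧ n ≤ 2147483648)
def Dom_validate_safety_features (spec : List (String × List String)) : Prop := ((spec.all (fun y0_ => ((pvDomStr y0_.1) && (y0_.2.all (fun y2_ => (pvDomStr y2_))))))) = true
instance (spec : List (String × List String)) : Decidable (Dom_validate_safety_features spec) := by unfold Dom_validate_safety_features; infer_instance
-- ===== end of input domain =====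

-- B replaces A's set difference + sorted() with a single-pass five-flag state machine and an unrolled check chain (objective: alternative).

-- ===== PORT A =====
def validate_safety_features (spec : List (String × List String)) : List String :=
  let errors : List String := []
  let required : PySem.Set String := PySem.Set.ofList
    ["filament_runout_detection", "jam_detection", "cold_extrusion_prevention",
     "encoder_based_tension_monitoring", "emergency_abort"]
  let declared : PySem.Set String :=
    PySem.Set.ofList ((PySem.Dict.mk spec).getD "safety_features" [])
  (PySem.List.sorted (PySem.Set.diff required declared) (fun x => x) false).foldl
    (fun errors feat => errors ++ ["Missing safety feature: " ++ feat]) errors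

-- ===== PORT B =====
-- the for-loop of Source B: five boolean flags updated by an if/elif chain, one pass
def featLoop : List String → (Bool × Bool × Bool × Bool × Bool) → (Bool × Bool × Bool × Bool × Bool)
  | [], st => st
  | f :: rest, (c, a, n, r, j) =>
    featLoop rest
      (if f == "cold_extrusion_prevention" then (true, a, n, r, j)
       else if f == "emergency_abort" then (c, true, n, r, j)
       else if f == "encoder_based_tension_monitoring" then (c, a, true, r, j)
       else if f == "filament_runout_detection" then (c, a, n, true, j)
       else if f == "jam_detection" then (c, a, n, r, true)
       else (c, a, n, r, j))

def validate_safety_features_alt (spec : List (String × List String)) : List String :=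
  let (c, a, n, r, j) :=
    featLoop ((PySem.Dict.mk spec).getD "safety_features" [])
      (false, false, false, false, false)
  let errors : List String := []
  let errors := if !c then errors ++ ["Missing safety feature: cold_extrusion_prevention"] else errors
  let errors := if !a then errors ++ ["Missing safety feature: emergency_abort"] else errors
  let errors := if !n then errors ++ ["Missing safety feature: encoder_based_tension_monitoring"] else errors
  let errors := if !r then errors ++ ["Missing safety feature: filament_runout_detection"] else errors
  let errors := if !j then errors ++ ["Missing safety feature: jam_detection"] else errors
  errors

-- ===== PRECONDITION & SPEC =====
def Spec_validate_safety_features (spec : List (String × List String)) (out : List String) : Prop := out = validate_safety_features_alt spec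
instance (spec : List (String × List String)) (out : List String) : Decidable (Spec_validate_safety_features spec out) := by unfold Spec_validate_safety_features; infer_instance

-- ===== CLAIM (what is proved, stated in full; the proofs are below) =====
def Claim_equal_validate_safety_features : Prop := ∀ (spec : List (String × List String)), Dom_validate_safety_features spec → Spec_validate_safety_features spec (validate_safety_features spec)

-- ===== LEMMAS AND PROOFS =====
lemma featLoop_spec (d : List String) (c a n r j : Bool) :
    featLoop d (c, a, n, r, j) =
      (c || d.contains "cold_extrusion_prevention",
       a || d.contains "emergency_abort",
       n || d.contains "encoder_based_tension_monitoring",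
       r || d.contains "filament_runout_detection",
       j || d.contains "jam_detection") := by
  induction d generalizing c a n r j with
  | nil => simp [featLoop]
  | cons x rest ih =>
    simp only [featLoop]
    split_ifs with h1 h2 h3 h4 h5 <;> rw [ih] <;> clear ih <;>
      simp_all [eq_comm (b := x)]

lemma req_ofList :
    PySem.Set.ofList
      ["filament_runout_detection", "jam_detection", "cold_extrusion_prevention",
       "encoder_based_tension_monitoring", "emergency_abort"]
    = ["filament_runout_detection", "jam_detection", "cold_extrusion_prevention",
       "encoder_based_tension_monitoring", "emergency_abort"] := by rfl

lemma key_lemma (d : List String) :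
    (PySem.List.sorted
      (PySem.Set.diff
        (PySem.Set.ofList
          ["filament_runout_detection", "jam_detection", "cold_extrusion_prevention",
           "encoder_based_tension_monitoring", "emergency_abort"])
        (PySem.Set.ofList d)) (fun x => x) false).foldl
        (fun errors feat => errors ++ ["Missing safety feature: " ++ feat]) []
    = validate_safety_features_alt (("safety_features", d) :: []) := by
  have hgetD : (PySem.Dict.mk [("safety_features", d)]).getD "safety_features" [] = d := by
    simp [PySem.Dict.getD, PySem.Dict.get?]
  by_cases h1 : "cold_extrusion_prevention" ∈ d <;>
  by_cases h2 : "emergency_abort" ∈ d <;>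
  by_cases h3 : "encoder_based_tension_monitoring" ∈ d <;>
  by_cases h4 : "filament_runout_detection" ∈ d <;>
  by_cases h5 : "jam_detection" ∈ d <;>
  simp [validate_safety_features_alt, hgetD, featLoop_spec, PySem.Set.diff,
    PySem.Set.mem_ofList, req_ofList, h1, h2, h3, h4, h5, List.contains_eq_mem, List.filter] <;>
  simp [PySem.List.sorted_eq_foldl_insertBy, PySem.List.insertBy, List.foldl] <;> decide

-- B's result depends on spec only through the first "safety_features" entry
lemma alt_getD (spec : List (String × List String)) :
    validate_safety_features_alt spec
      = validate_safety_features_alt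
          [("safety_features", (PySem.Dict.mk spec).getD "safety_features" [])] := by
  simp [validate_safety_features_alt, PySem.Dict.getD, PySem.Dict.get?]

-- ===== VERDICT (by name: the statement is the Claim_ definition above) =====
theorem validate_safety_features_spec : Claim_equal_validate_safety_features := by
  intro spec _
  unfold Spec_validate_safety_features validate_safety_features
  rw [alt_getD]
  exact key_lemma _
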